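-- pv_equiv track=rewrite | github.com/ocavue/leetcode | 413.arithmetic-slices.py | group_diff
-- ===== SOURCE A (Python) =====
-- from typing import List
--
-- def group_diff(diffs: List[int]):
--     assert len(diffs) >= 1
--     last_diff = diffs[0]
--     diff_count = 1
--     for diff in diffs[1:]:
--         if diff == last_diff:
--             diff_count += 1
--         else:
--             if diff_count >= 2:
--                 yield last_diff, diff_count
--             last_diff = diff
--             diff_count = 1
--     if diff_count >= 2:
--         yield last_diff, diff_count
-- ===== SOURCE B (Python) =====
-- from typing import List
--
-- def group_diff(diffs: List[int]):
--     assert len(diffs) >= 1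
--     i, n = 0, len(diffs)
--     while i < n:
--         j = i + 1
--         while j < n and diffs[j] == diffs[i]:
--             j += 1
--         if j - i >= 2:
--             yield diffs[i], j - i
--         i = j
-- ===== Notes on version B (the rewrite author's own statement) =====
-- stated objective: alternative
-- what changed: B is a run-splitting generator: it scans ahead to find each maximal run of equal values, yields it if its length is >= 2, and continues on the remaining suffix, instead of A's single pass carrying last_diff/diff_count state with deferred emission.
import Mathlib
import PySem

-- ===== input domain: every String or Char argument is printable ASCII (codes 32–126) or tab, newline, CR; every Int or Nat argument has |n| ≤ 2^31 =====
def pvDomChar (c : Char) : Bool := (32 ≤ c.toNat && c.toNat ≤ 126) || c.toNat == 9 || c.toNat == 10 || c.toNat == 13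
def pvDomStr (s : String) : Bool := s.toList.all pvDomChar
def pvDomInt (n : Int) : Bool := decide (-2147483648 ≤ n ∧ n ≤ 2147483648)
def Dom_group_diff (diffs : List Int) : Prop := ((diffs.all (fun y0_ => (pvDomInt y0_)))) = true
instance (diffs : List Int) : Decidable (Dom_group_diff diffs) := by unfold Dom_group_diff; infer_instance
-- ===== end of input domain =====

-- B replaces A's carried last/count state by a run-splitting recursion (alternative decomposition; return-value equivalence; A's generator is ported as the list of yielded pairs).
-- ===== PORT A =====
-- A's for-loop over diffs[1:] carrying (last_diff, diff_count), emitting on run change and at the end.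
def groupDiffLoopA : List Int → Int → Int → List (Int × Int)
  | [], last, cnt => if cnt ≥ 2 then [(last, cnt)] else []
  | d :: rest, last, cnt =>
    if d = last then groupDiffLoopA rest last (cnt + 1)
    else (if cnt ≥ 2 then [(last, cnt)] else []) ++ groupDiffLoopA rest d 1

def group_diff (diffs : List Int) : List (Int × Int) :=
  match diffs with
  | [] => []   -- excluded by Pre_: the Python asserts len(diffs) >= 1
  | h :: t => groupDiffLoopA t h 1

-- ===== PORT B =====
-- Source B: split off the maximal run of the head element (the inner `while k` scan = takeWhile/dropWhile), yield it if its length >= 2, recurse on the rest.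
def group_diff_alt (diffs : List Int) : List (Int × Int) :=
  match diffs with
  | [] => []
  | h :: t =>
    let k : Int := 1 + ((t.takeWhile (· == h)).length : Int)
    (if k ≥ 2 then [(h, k)] else []) ++ group_diff_alt (t.dropWhile (· == h))
termination_by diffs.length
decreasing_by
  simp only [List.length_cons]
  exact Nat.lt_succ_of_le (List.length_dropWhile_le _ _)

-- ===== PRECONDITION & SPEC =====
-- Pre_ excludes the empty list, on which the Python A raises AssertionError (so does B).
def Pre_group_diff (diffs : List Int) : Prop := diffs ≠ []
instance (diffs : List Int) : Decidable (Pre_group_diff diffs) := by unfold Pre_group_diff; infer_instance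
def pvWitness_group_diff : List Int := [1, 1, 2]
def Spec_group_diff (diffs : List Int) (out : List (Int × Int)) : Prop := out = group_diff_alt diffs
instance (diffs : List Int) (out : List (Int × Int)) : Decidable (Spec_group_diff diffs out) := by unfold Spec_group_diff; infer_instance

-- ===== CLAIM (what is proved, stated in full; the proofs are below) =====
def Claim_equal_group_diff : Prop := ∀ (diffs : List Int), Dom_group_diff diffs → Pre_group_diff diffs → Spec_group_diff diffs (group_diff diffs)

-- ===== LEMMAS AND PROOFS =====
lemma groupDiffLoopA_eq_alt (t : List Int) : ∀ (last cnt : Int),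
    groupDiffLoopA t last cnt =
      (if cnt + ((t.takeWhile (· == last)).length : Int) ≥ 2
        then [(last, cnt + ((t.takeWhile (· == last)).length : Int))] else [])
        ++ group_diff_alt (t.dropWhile (· == last)) := by
  induction t with
  | nil => intro last cnt; simp [groupDiffLoopA, group_diff_alt]
  | cons d t ih =>
    intro last cnt
    by_cases hd : d = last
    · subst hd
      simp only [groupDiffLoopA, List.takeWhile, List.dropWhile, beq_self_eq_true,
        List.length_cons]
      rw [ih]
      have h1 : (cnt + 1) + ((t.takeWhile (· == d)).length : Int)
          = cnt + ((((t.takeWhile (· == d)).length : Nat) + 1 : Nat) : Int) := by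
        push_cast; ring
      rw [h1]
      simp
    · have hbeq : (d == last) = false := beq_eq_false_iff_ne.mpr hd
      simp only [groupDiffLoopA, if_neg hd, List.takeWhile, List.dropWhile, hbeq,
        List.length_nil, Int.natCast_zero, add_zero]
      rw [ih]
      try (conv_rhs => rw [group_diff_alt]); try simp [add_comm]

-- ===== VERDICT (by name: the statement is the Claim_ definition above) =====
theorem group_diff_spec : Claim_equal_group_diff := by
  intro diffs _ hpre
  unfold Spec_group_diff
  match diffs with
  | [] => exact absurd rfl hpre
  | h :: t =>
    show groupDiffLoopA t h 1 = _
    rw [groupDiffLoopA_eq_alt]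
    try (conv_rhs => rw [group_diff_alt]); try simp [add_comm]
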